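-- pv_equiv track=rewrite | github.com/brfarlow/AoC2020 | day12.py | part_2_move
-- ===== SOURCE A (Python) =====
-- def part_2_move(direction, amount, facing, x_pos, y_pos, way_x, way_y):
--     if direction == 'N':
--         way_y += amount
--     elif direction == 'S':
--         way_y -= amount
--     elif direction == 'E':
--         way_x += amount
--     elif direction == 'W':
--         way_x -= amount
--     elif direction == 'L':
--         for _ in range(amount // 90):
--             way_x, way_y = -way_y, way_x
--     elif direction == 'R':
--         for _ in range( amount // 90):
--             way_x, way_y = way_y, -way_x
--     else:  # F
--         x_pos += way_x * amount
--         y_pos += way_y * amount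
--
--     return x_pos, y_pos, facing, way_x, way_y
-- ===== SOURCE B (Python) =====
-- def part_2_move(direction, amount, facing, x_pos, y_pos, way_x, way_y):
--     if direction in ('L', 'R'):
--         # closed-form rotation: number of counter-clockwise quarter turns
--         quarters = max(amount // 90, 0) % 4
--         if direction == 'R':
--             quarters = (4 - quarters) % 4
--         table = ((way_x, way_y), (-way_y, way_x), (-way_x, -way_y), (way_y, -way_x))
--         way_x, way_y = table[quarters]
--     elif direction in ('N', 'S', 'E', 'W'):
--         sign = 1 if direction in ('N', 'E') else -1
--         if direction in ('N', 'S'):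
--             way_y += sign * amount
--         else:
--             way_x += sign * amount
--     else:  # F
--         x_pos += way_x * amount
--         y_pos += way_y * amount
--     return x_pos, y_pos, facing, way_x, way_y
-- ===== Notes on version B (the rewrite author's own statement) =====
-- stated objective: alternative
-- what changed: The L/R quarter-turn loop (amount//90 iterations) is replaced by a closed-form rotation-table lookup (clamp amount//90 to >= 0, reduce mod 4, index into the four rotated waypoints), and the N/S/E/W branches collapse to a single sign/axis computation.
import Mathlib
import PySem

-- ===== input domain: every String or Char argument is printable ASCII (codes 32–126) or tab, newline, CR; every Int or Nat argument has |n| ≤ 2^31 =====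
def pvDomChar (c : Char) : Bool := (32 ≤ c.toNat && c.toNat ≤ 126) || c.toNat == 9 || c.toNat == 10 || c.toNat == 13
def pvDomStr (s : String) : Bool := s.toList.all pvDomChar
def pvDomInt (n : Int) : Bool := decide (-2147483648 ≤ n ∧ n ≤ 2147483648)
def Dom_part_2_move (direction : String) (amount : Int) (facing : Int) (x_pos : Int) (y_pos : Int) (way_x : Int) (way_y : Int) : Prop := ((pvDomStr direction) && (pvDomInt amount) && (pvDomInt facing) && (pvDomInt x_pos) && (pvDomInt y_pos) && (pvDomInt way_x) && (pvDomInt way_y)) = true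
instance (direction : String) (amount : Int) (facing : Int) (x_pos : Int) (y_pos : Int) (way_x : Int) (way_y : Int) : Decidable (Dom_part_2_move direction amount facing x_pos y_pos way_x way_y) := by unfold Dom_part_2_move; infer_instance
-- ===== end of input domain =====

-- B restructures A: the L/R quarter-turn loop becomes a closed-form table lookup (clamp amount//90 to ≥ 0, mod 4) and N/S/E/W collapse to a sign computation; objective: alternative (constant-time rotation; no speedup measured).


-- ===== PORT A =====
-- the body of A's 'for _ in range(n)' loop, iterated m times (range(n) runs max(n,0) times, = n.toNat)
def pvIterRot (r : Int × Int → Int × Int) : Nat → Int × Int → Int × Int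
  | 0, p => p
  | m + 1, p => pvIterRot r m (r p)

def pvRotL (p : Int × Int) : Int × Int := (-p.2, p.1)
def pvRotR (p : Int × Int) : Int × Int := (p.2, -p.1)

def part_2_move (direction : String) (amount : Int) (facing : Int) (x_pos : Int) (y_pos : Int) (way_x : Int) (way_y : Int) : Int × Int × Int × Int × Int :=
  if direction == "N" then (x_pos, y_pos, facing, way_x, way_y + amount)
  else if direction == "S" then (x_pos, y_pos, facing, way_x, way_y - amount)
  else if direction == "E" then (x_pos, y_pos, facing, way_x + amount, way_y)
  else if direction == "W" then (x_pos, y_pos, facing, way_x - amount, way_y)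
  else if direction == "L" then
    let p := pvIterRot pvRotL (PySem.Int.floordiv amount 90).toNat (way_x, way_y)
    (x_pos, y_pos, facing, p.1, p.2)
  else if direction == "R" then
    let p := pvIterRot pvRotR (PySem.Int.floordiv amount 90).toNat (way_x, way_y)
    (x_pos, y_pos, facing, p.1, p.2)
  else (x_pos + way_x * amount, y_pos + way_y * amount, facing, way_x, way_y)

-- ===== PORT B =====
def part_2_move_alt (direction : String) (amount : Int) (facing : Int) (x_pos : Int) (y_pos : Int) (way_x : Int) (way_y : Int) : Int × Int × Int × Int × Int :=
  if direction == "L" || direction == "R" then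
    let quarters0 : Int := PySem.Int.mod (max (PySem.Int.floordiv amount 90) 0) 4
    let quarters : Int := if direction == "R" then PySem.Int.mod (4 - quarters0) 4 else quarters0
    let table : List (Int × Int) := [(way_x, way_y), (-way_y, way_x), (-way_x, -way_y), (way_y, -way_x)]
    -- table[quarters]: 0 ≤ quarters < 4 always holds, so the IndexError (none) arm is unreachable
    match PySem.List.pyGet? table quarters with
    | some p => (x_pos, y_pos, facing, p.1, p.2)
    | none => (x_pos, y_pos, facing, way_x, way_y)
  else if direction == "N" || direction == "S" || direction == "E" || direction == "W" then
    let sign : Int := if direction == "N" || direction == "E" then 1 else -1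
    if direction == "N" || direction == "S" then
      (x_pos, y_pos, facing, way_x, way_y + sign * amount)
    else
      (x_pos, y_pos, facing, way_x + sign * amount, way_y)
  else (x_pos + way_x * amount, y_pos + way_y * amount, facing, way_x, way_y)

-- ===== PRECONDITION & SPEC =====
def Spec_part_2_move (direction : String) (amount : Int) (facing : Int) (x_pos : Int) (y_pos : Int) (way_x : Int) (way_y : Int) (out : Int × Int × Int × Int × Int) : Prop := out = part_2_move_alt direction amount facing x_pos y_pos way_x way_y
instance (direction : String) (amount : Int) (facing : Int) (x_pos : Int) (y_pos : Int) (way_x : Int) (way_y : Int) (out : Int × Int × Int × Int × Int) : Decidable (Spec_part_2_move direction amount facing x_pos y_pos way_x way_y out) := by unfold Spec_part_2_move; infer_instance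

-- ===== CLAIM (what is proved, stated in full; the proofs are below) =====
def Claim_equal_part_2_move : Prop := ∀ (direction : String) (amount : Int) (facing : Int) (x_pos : Int) (y_pos : Int) (way_x : Int) (way_y : Int), Dom_part_2_move direction amount facing x_pos y_pos way_x way_y → Spec_part_2_move direction amount facing x_pos y_pos way_x way_y (part_2_move direction amount facing x_pos y_pos way_x way_y)

-- ===== LEMMAS AND PROOFS =====

lemma pvIterRot_mod (r : Int × Int → Int × Int) (h4 : ∀ p, r (r (r (r p))) = p) :
    ∀ (m : Nat) (p : Int × Int), pvIterRot r m p = pvIterRot r (m % 4) p := by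
  intro m
  induction m using Nat.strong_induction_on with
  | _ m ih =>
    intro p
    by_cases h : m < 4
    · rw [Nat.mod_eq_of_lt h]
    · obtain ⟨m', rfl⟩ : ∃ m', m = m' + 4 := ⟨m - 4, by omega⟩
      have : pvIterRot r (m' + 4) p = pvIterRot r m' p := by
        simp [pvIterRot, h4]
      rw [this, ih m' (by omega), Nat.add_mod_right m' 4]

theorem part_2_move_spec : Claim_equal_part_2_move := by
  intro direction amount facing x_pos y_pos way_x way_y _
  unfold Spec_part_2_move part_2_move part_2_move_alt
  set n : Int := PySem.Int.floordiv amount 90 with hn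
  have hmax : max n 0 = ((n.toNat : Nat) : Int) := by omega
  have h4L : ∀ p, pvRotL (pvRotL (pvRotL (pvRotL p))) = p := by intro p; simp [pvRotL]
  have h4R : ∀ p, pvRotR (pvRotR (pvRotR (pvRotR p))) = p := by intro p; simp [pvRotR]
  have hm4 : n.toNat % 4 = 0 ∨ n.toNat % 4 = 1 ∨ n.toNat % 4 = 2 ∨ n.toNat % 4 = 3 := by omega
  by_cases hL : direction = "L"
  · subst hL
    rw [pvIterRot_mod pvRotL h4L n.toNat (way_x, way_y)]
    rcases hm4 with h | h | h | h <;> rw [h] <;>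
      [ (have hx : max n 0 % 4 = 0 := by omega);
        (have hx : max n 0 % 4 = 1 := by omega);
        (have hx : max n 0 % 4 = 2 := by omega);
        (have hx : max n 0 % 4 = 3 := by omega)] <;>
      simp [hx, pvIterRot, pvRotL, PySem.List.pyGet?, PySem.List.pyIdx?]
  by_cases hR : direction = "R"
  · subst hR
    rw [pvIterRot_mod pvRotR h4R n.toNat (way_x, way_y)]
    rcases hm4 with h | h | h | h <;> rw [h] <;>
      [ (have hx : max n 0 % 4 = 0 := by omega);
        (have hx : max n 0 % 4 = 1 := by omega);
        (have hx : max n 0 % 4 = 2 := by omega);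
        (have hx : max n 0 % 4 = 3 := by omega)] <;>
      simp [hx, pvIterRot, pvRotR, PySem.List.pyGet?, PySem.List.pyIdx?]
  by_cases h1 : direction = "N"
  · subst h1; simp
  by_cases h2 : direction = "S"
  · subst h2; simp; ring
  by_cases h3 : direction = "E"
  · subst h3; simp
  by_cases h4 : direction = "W"
  · subst h4; simp; ring
  have b1 : (direction == "N") = false := by simpa using h1
  have b2 : (direction == "S") = false := by simpa using h2
  have b3 : (direction == "E") = false := by simpa using h3
  have b4 : (direction == "W") = false := by simpa using h4
  have b5 : (direction == "L") = false := by simpa using hL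
  have b6 : (direction == "R") = false := by simpa using hR
  simp [b1, b2, b3, b4, b5, b6]
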